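-- pv_equiv track=rewrite | github.com/mojaveazure/SNP_Utils | Utilities/utilities.py | rank_remove
-- ===== SOURCE A (Python) =====
-- def rank_remove(data, lowest=False):
--     """Rank values of a list or tuple and take only the highest (or lowest)"""
--     try:
--         #   Ensure our data is a list or tuple
--         assert isinstance(data, (list, tuple))
--         assert isinstance(lowest, bool)
--     except AssertionError:
--         raise TypeError("'data' must be of type 'list' or 'tuple', 'lowest' must be of type 'bool'")
--     #   Create our first result
--     try:
--         result = [data[0]]
--     except KeyError: # There must be at least one data entry
--         raise ValueError("'data' must have at least one value")
--     try:
--         for value in data[1:]: # For every other data point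
--             if lowest: # If we're looking for the lowest rank
--                 if value < result[0]: # If lower
--                     result = [value] # Replace
--                 elif value == result[0]: # If equal
--                     result.append(value) # Add
--                 else: # Otherwise
--                     continue # Pass
--             else: # If we're looking for the highest rank
--                 if value > result[0]: # If greater
--                     result = [value] # Replace
--                 elif value == result[0]: # If equal
--                     result.append(value) # Add
--                 else: # Otherwise
--                     continue # Pass
--     except KeyError: # If there is only one data point (taken above)
--         pass # Skip this, we return the one point
--     except: # Other exceptions
--         raise # Let someone else deal with it
--     return result # Return our list
-- ===== SOURCE B (Python) =====
-- def rank_remove(data, lowest=False):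
--     """Rank values of a list or tuple and take only the highest (or lowest)"""
--     if not (isinstance(data, (list, tuple)) and isinstance(lowest, bool)):
--         raise TypeError("'data' must be of type 'list' or 'tuple', 'lowest' must be of type 'bool'")
--     data[0]  # at least one entry required (IndexError otherwise, as in A)
--     ext = min(data) if lowest else max(data)
--     return [value for value in data if value == ext]
-- ===== Notes on version B (the rewrite author's own statement) =====
-- stated objective: simpler
-- what changed: Replaces the single-pass running-best loop that rebuilds/extends the result list with a two-pass shape: compute the extreme with min/max, then filter all equal values.
import Mathlib
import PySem

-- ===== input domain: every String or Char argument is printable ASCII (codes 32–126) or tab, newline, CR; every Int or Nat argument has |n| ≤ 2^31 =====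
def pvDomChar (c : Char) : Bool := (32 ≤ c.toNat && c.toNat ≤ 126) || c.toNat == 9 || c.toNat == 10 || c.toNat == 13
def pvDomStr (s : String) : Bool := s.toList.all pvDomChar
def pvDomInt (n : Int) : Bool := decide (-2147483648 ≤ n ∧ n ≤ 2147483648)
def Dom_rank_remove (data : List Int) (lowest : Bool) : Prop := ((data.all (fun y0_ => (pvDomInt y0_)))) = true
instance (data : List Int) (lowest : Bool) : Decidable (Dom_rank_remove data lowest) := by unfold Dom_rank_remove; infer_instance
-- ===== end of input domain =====

-- B computes the extreme with min/max and filters equal values (two passes) instead of A's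
-- single running-best loop; equivalence of return values on nonempty lists ([] raises in both).


-- ===== PORT A =====
-- one loop step of A: compare value against result[0], replace / append / keep
def rankStep (lowest : Bool) (result : List Int) (value : Int) : List Int :=
  match lowest with
  | true =>
    if value < result.headD 0 then [value]
    else if value = result.headD 0 then result ++ [value]
    else result
  | false =>
    if value > result.headD 0 then [value]
    else if value = result.headD 0 then result ++ [value]
    else result

def rank_remove (data : List Int) (lowest : Bool) : List Int :=
  match data with
  | [] => []   -- Python raises IndexError here; excluded by Pre_
  | d :: rest => rest.foldl (rankStep lowest) [d]

-- ===== PORT B =====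
def rank_remove_alt (data : List Int) (lowest : Bool) : List Int :=
  match data with
  | [] => []   -- Python raises IndexError here; excluded by Pre_
  | _ :: _ =>
    let ext := (if lowest then PySem.List.min? data (fun x => x)
                else PySem.List.max? data (fun x => x)).getD 0
    data.filter (fun value => value == ext)

-- ===== PRECONDITION & SPEC =====
-- A raises IndexError on the empty list (and B too); excluded.
def Pre_rank_remove (data : List Int) (lowest : Bool) : Prop := data ≠ []
instance (data : List Int) (lowest : Bool) : Decidable (Pre_rank_remove data lowest) := by unfold Pre_rank_remove; infer_instance
def pvWitness_rank_remove : List Int × Bool := ([3, 1, 3, 2], false)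

def Spec_rank_remove (data : List Int) (lowest : Bool) (out : List Int) : Prop := out = rank_remove_alt data lowest
instance (data : List Int) (lowest : Bool) (out : List Int) : Decidable (Spec_rank_remove data lowest out) := by unfold Spec_rank_remove; infer_instance

-- ===== CLAIM (what is proved, stated in full; the proofs are below) =====
def Claim_equal_rank_remove : Prop := ∀ (data : List Int) (lowest : Bool), Dom_rank_remove data lowest → Pre_rank_remove data lowest → Spec_rank_remove data lowest (rank_remove data lowest)

-- ===== LEMMAS AND PROOFS =====

theorem le_foldl_max_int (l : List Int) (m : Int) : m ≤ l.foldl max m := by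
  induction l generalizing m with
  | nil => exact le_refl m
  | cons v t ih => exact le_trans (le_max_left m v) (ih (max m v))

theorem foldl_min_le_int (l : List Int) (m : Int) : l.foldl min m ≤ m := by
  induction l generalizing m with
  | nil => exact le_refl m
  | cons v t ih => exact le_trans (ih (min m v)) (min_le_left m v)

-- A's highest-rank loop, started from k ≥ 1 copies of m, produces copies of the running max.
theorem rank_loop_max (l : List Int) (m : Int) (k : Nat) (hk : 1 ≤ k) :
    l.foldl (rankStep false) (List.replicate k m)
      = List.replicate ((if l.foldl max m = m then k else 0) + l.count (l.foldl max m)) (l.foldl max m) := by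
  induction l generalizing m k with
  | nil => simp
  | cons v t ih =>
    have hhead : (List.replicate k m).headD 0 = m := by
      cases k with
      | zero => omega
      | succ n => simp [List.replicate]
    simp only [List.foldl_cons, rankStep, hhead]
    rcases lt_trichotomy v m with hv | hv | hv
    · -- v < m : keep result, max m v = m
      have h1 : ¬ v > m := by omega
      have h2 : v ≠ m := by omega
      rw [if_neg h1, if_neg h2]
      have hmax : max m v = m := by omega
      simp only [hmax]
      rw [ih m k hk, List.count_cons]
      have hne : t.foldl max m ≠ v := by
        have := le_foldl_max_int t m; omega
      simp [hne]
      exact fun h => hne h.symm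
    · -- v = m : append a copy
      subst hv
      have h1 : ¬ v > v := by omega
      rw [if_neg h1, if_pos rfl]
      have hrep : List.replicate k v ++ [v] = List.replicate (k + 1) v := by
        simp [List.replicate_succ']
      have hmax : max v v = v := by omega
      simp only [hmax]
      rw [hrep, ih v (k + 1) (by omega), List.count_cons]
      by_cases he : t.foldl max v = v
      · simp only [he, if_pos rfl, beq_self_eq_true, if_true]
        congr 1
        omega
      · have : (t.foldl max v == v) = false := by simp [he]
        simp [he, this]
        exact fun h => he h.symm
    · -- v > m : replace
      rw [if_pos hv]
      have hrep : ([v] : List Int) = List.replicate 1 v := rfl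
      have hmax : max m v = v := by omega
      simp only [hmax]
      rw [hrep, ih v 1 (le_refl 1), List.count_cons]
      have he : t.foldl max v ≠ m := by
        have := le_foldl_max_int t v; omega
      rw [if_neg he]
      by_cases hv2 : t.foldl max v = v
      · simp only [hv2, if_pos rfl, beq_self_eq_true, if_true]
        congr 1
        omega
      · have : (t.foldl max v == v) = false := by simp [hv2]
        simp [hv2, this]
        exact fun h => hv2 h.symm

-- A's lowest-rank loop, symmetric.
theorem rank_loop_min (l : List Int) (m : Int) (k : Nat) (hk : 1 ≤ k) :
    l.foldl (rankStep true) (List.replicate k m)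
      = List.replicate ((if l.foldl min m = m then k else 0) + l.count (l.foldl min m)) (l.foldl min m) := by
  induction l generalizing m k with
  | nil => simp
  | cons v t ih =>
    have hhead : (List.replicate k m).headD 0 = m := by
      cases k with
      | zero => omega
      | succ n => simp [List.replicate]
    simp only [List.foldl_cons, rankStep, hhead]
    rcases lt_trichotomy m v with hv | hv | hv
    · -- v > m : keep result, min m v = m
      have h1 : ¬ v < m := by omega
      have h2 : v ≠ m := by omega
      rw [if_neg h1, if_neg h2]
      have hmin : min m v = m := by omega
      simp only [hmin]
      rw [ih m k hk, List.count_cons]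
      have hne : t.foldl min m ≠ v := by
        have := foldl_min_le_int t m; omega
      simp [hne]
      exact fun h => hne h.symm
    · -- v = m : append a copy
      cases hv
      have h1 : ¬ v < v := by omega
      rw [if_neg h1, if_pos rfl]
      have hrep : List.replicate k v ++ [v] = List.replicate (k + 1) v := by
        simp [List.replicate_succ']
      have hmin : min v v = v := by omega
      simp only [hmin]
      rw [hrep, ih v (k + 1) (by omega), List.count_cons]
      by_cases he : t.foldl min v = v
      · simp only [he, if_pos rfl, beq_self_eq_true, if_true]
        congr 1
        omega
      · have : (t.foldl min v == v) = false := by simp [he]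
        simp [he, this]
        exact fun h => he h.symm
    · -- v < m : replace
      rw [if_pos hv]
      have hrep : ([v] : List Int) = List.replicate 1 v := rfl
      have hmin : min m v = v := by omega
      simp only [hmin]
      rw [hrep, ih v 1 (le_refl 1), List.count_cons]
      have he : t.foldl min v ≠ m := by
        have := foldl_min_le_int t v; omega
      rw [if_neg he]
      by_cases hv2 : t.foldl min v = v
      · simp only [hv2, if_pos rfl, beq_self_eq_true, if_true]
        congr 1
        omega
      · have : (t.foldl min v == v) = false := by simp [hv2]
        simp [hv2, this]
        exact fun h => hv2 h.symm

theorem filter_eq_replicate_count (l : List Int) (a : Int) :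
    l.filter (fun x => x == a) = List.replicate (l.count a) a := by
  induction l with
  | nil => simp
  | cons v t ih =>
    by_cases h : v = a
    · subst h; simp [List.filter_cons, ih, List.replicate_succ]
    · simp [List.filter_cons, h, ih]

-- ===== VERDICT (by name: the statement is the Claim_ definition above) =====
theorem rank_remove_spec : Claim_equal_rank_remove := by
  intro data lowest _ hpre
  unfold Spec_rank_remove
  match data with
  | [] => exact absurd rfl hpre
  | d :: rest =>
    cases lowest with
    | false =>
      show rest.foldl (rankStep false) [d] = _
      have h1 : ([d] : List Int) = List.replicate 1 d := rfl
      rw [h1, rank_loop_max rest d 1 (le_refl 1)]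
      simp only [rank_remove_alt, Bool.false_eq_true, if_false, PySem.List.max?_id_cons,
        Option.getD_some]
      rw [filter_eq_replicate_count, List.count_cons]
      by_cases he : rest.foldl max d = d
      · simp only [he, if_pos rfl, beq_self_eq_true, if_true]
        congr 1
        omega
      · have hb : (rest.foldl max d == d) = false := by simp [he]
        simp [he, hb]
        exact fun h => he h.symm
    | true =>
      show rest.foldl (rankStep true) [d] = _
      have h1 : ([d] : List Int) = List.replicate 1 d := rfl
      rw [h1, rank_loop_min rest d 1 (le_refl 1)]
      simp only [rank_remove_alt, if_pos rfl, PySem.List.min?_id_cons, Option.getD_some]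
      rw [filter_eq_replicate_count, List.count_cons]
      by_cases he : rest.foldl min d = d
      · simp only [he, Option.getD_some, if_pos rfl, beq_self_eq_true, if_true]
        congr 1
        omega
      · have hb : (rest.foldl min d == d) = false := by simp [he]
        simp [he, hb]
        exact fun h => he h.symm
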